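-- pv_equiv track=rewrite | github.com/erwanrag/ETL_S918 | projects/ETL/flows/orchestration/parallel_helpers.py | group_tables_by_size
-- ===== SOURCE A (Python) =====
-- def group_tables_by_size(tables: list, table_sizes: dict) -> dict:
--     """
--     Groupe les tables par taille pour parallélisation optimale
--
--     Seuils :
--     - Small  : < 10,000 lignes  -> Parallèle max
--     - Medium : 10K - 50K lignes -> Parallèle limité (3 threads)
--     - Large  : > 50K lignes     -> Séquentiel
--     """
--     groups = {
--         'small': [],
--         'medium': [],
--         'large': []
--     }
--
--     for table in tables:
--         row_count = table_sizes.get(table, 0)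
--
--         if row_count < 10_000:
--             groups['small'].append(table)
--         elif row_count < 50_000:
--             groups['medium'].append(table)
--         else:
--             groups['large'].append(table)
--
--     return groups
-- ===== SOURCE B (Python) =====
-- def group_tables_by_size(tables: list, table_sizes: dict) -> dict:
--     """Three filtering passes (one per size class) instead of one bucketing loop."""
--     return {
--         'small': [t for t in tables if table_sizes.get(t, 0) < 10_000],
--         'medium': [t for t in tables if 10_000 <= table_sizes.get(t, 0) < 50_000],
--         'large': [t for t in tables if table_sizes.get(t, 0) >= 50_000],
--     }
-- ===== Notes on version B (the rewrite author's own statement) =====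
-- stated objective: alternative
-- what changed: Replaces the single bucketing loop that appends into a pre-built dict with three independent filtering passes over tables, one list comprehension per size class, assembled directly into the result dict.
import Mathlib
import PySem

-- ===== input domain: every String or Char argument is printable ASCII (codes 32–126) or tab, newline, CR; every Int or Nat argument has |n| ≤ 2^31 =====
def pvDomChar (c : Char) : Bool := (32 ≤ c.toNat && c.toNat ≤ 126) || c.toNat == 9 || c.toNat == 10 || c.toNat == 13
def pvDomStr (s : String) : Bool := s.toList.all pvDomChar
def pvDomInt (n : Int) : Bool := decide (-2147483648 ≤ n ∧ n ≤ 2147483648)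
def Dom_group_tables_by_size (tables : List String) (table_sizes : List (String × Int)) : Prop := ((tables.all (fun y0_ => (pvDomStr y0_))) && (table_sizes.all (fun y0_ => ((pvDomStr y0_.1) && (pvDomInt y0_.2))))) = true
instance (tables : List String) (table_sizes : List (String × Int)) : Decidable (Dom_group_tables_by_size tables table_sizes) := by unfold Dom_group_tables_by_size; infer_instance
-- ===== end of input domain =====

-- B replaces A's single bucketing loop with three independent filter passes (one per size class); alternative decomposition, same O(n·m) cost.


-- ===== PORT A =====
-- Port of A: fold over tables, appending each table into the matching bucket of a
-- pre-built dict {'small': [], 'medium': [], 'large': []}; returns the dict's items.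
def group_tables_by_size (tables : List String) (table_sizes : List (String × Int)) : List (String × List String) :=
  (tables.foldl (fun g table =>
      let row_count := (PySem.Dict.mk table_sizes).getD table 0
      if row_count < 10000 then g.modify "small" [] (fun xs => xs ++ [table])
      else if row_count < 50000 then g.modify "medium" [] (fun xs => xs ++ [table])
      else g.modify "large" [] (fun xs => xs ++ [table]))
    (PySem.Dict.ofList [("small", []), ("medium", []), ("large", [])])).items

-- ===== PORT B =====
-- Port of B: three independent filter passes, one per size class.
def group_tables_by_size_alt (tables : List String) (table_sizes : List (String × Int)) : List (String × List String) :=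
  [("small", tables.filter (fun t => (PySem.Dict.mk table_sizes).getD t 0 < 10000)),
   ("medium", tables.filter (fun t =>
      10000 ≤ (PySem.Dict.mk table_sizes).getD t 0 ∧ (PySem.Dict.mk table_sizes).getD t 0 < 50000)),
   ("large", tables.filter (fun t => 50000 ≤ (PySem.Dict.mk table_sizes).getD t 0))]

-- ===== PRECONDITION & SPEC =====
def Spec_group_tables_by_size (tables : List String) (table_sizes : List (String × Int)) (out : List (String × List String)) : Prop := out = group_tables_by_size_alt tables table_sizes
instance (tables : List String) (table_sizes : List (String × Int)) (out : List (String × List String)) : Decidable (Spec_group_tables_by_size tables table_sizes out) := by unfold Spec_group_tables_by_size; infer_instance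

-- ===== CLAIM (what is proved, stated in full; the proofs are below) =====
def Claim_equal_group_tables_by_size : Prop := ∀ (tables : List String) (table_sizes : List (String × Int)), Dom_group_tables_by_size tables table_sizes → Spec_group_tables_by_size tables table_sizes (group_tables_by_size tables table_sizes)

-- ===== LEMMAS AND PROOFS =====

-- ===== VERDICT (by name: the statement is the Claim_ definition above) =====
lemma gtbs_fold (table_sizes : List (String × Int)) (ts : List String) (s m l : List String) :
    (ts.foldl (fun g table =>
      let row_count := (PySem.Dict.mk table_sizes).getD table 0
      if row_count < 10000 then g.modify "small" [] (fun xs => xs ++ [table])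
      else if row_count < 50000 then g.modify "medium" [] (fun xs => xs ++ [table])
      else g.modify "large" [] (fun xs => xs ++ [table]))
      (PySem.Dict.mk [("small", s), ("medium", m), ("large", l)])).items
    = [("small", s ++ ts.filter (fun t => (PySem.Dict.mk table_sizes).getD t 0 < 10000)),
       ("medium", m ++ ts.filter (fun t =>
          decide (10000 ≤ (PySem.Dict.mk table_sizes).getD t 0 ∧ (PySem.Dict.mk table_sizes).getD t 0 < 50000))),
       ("large", l ++ ts.filter (fun t => 50000 ≤ (PySem.Dict.mk table_sizes).getD t 0))] := by
  induction ts generalizing s m l with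
  | nil => simp
  | cons t ts ih =>
    simp only [List.foldl_cons, List.filter_cons]
    by_cases h1 : (PySem.Dict.mk table_sizes).getD t 0 < 10000
    · rw [if_pos h1]
      have : (PySem.Dict.mk [("small", s), ("medium", m), ("large", l)]).modify "small" [] (fun xs => xs ++ [t])
          = PySem.Dict.mk [("small", s ++ [t]), ("medium", m), ("large", l)] := by
        apply PySem.Dict.ext; simp [PySem.Dict.modify, PySem.Dict.insert, PySem.Dict.getD, PySem.Dict.get?, PySem.Dict.contains]
      rw [this, ih]
      simp only [decide_eq_true_eq]
      rw [if_pos h1, if_neg (by omega), if_neg (by omega)]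
      simp
    · rw [if_neg h1]
      by_cases h2 : (PySem.Dict.mk table_sizes).getD t 0 < 50000
      · rw [if_pos h2]
        have : (PySem.Dict.mk [("small", s), ("medium", m), ("large", l)]).modify "medium" [] (fun xs => xs ++ [t])
            = PySem.Dict.mk [("small", s), ("medium", m ++ [t]), ("large", l)] := by
          apply PySem.Dict.ext; simp [PySem.Dict.modify, PySem.Dict.insert, PySem.Dict.getD, PySem.Dict.get?, PySem.Dict.contains]
        rw [this, ih]
        simp only [decide_eq_true_eq]
        rw [if_neg (by omega), if_pos (by omega), if_neg (by omega)]
        simp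
      · rw [if_neg h2]
        have : (PySem.Dict.mk [("small", s), ("medium", m), ("large", l)]).modify "large" [] (fun xs => xs ++ [t])
            = PySem.Dict.mk [("small", s), ("medium", m), ("large", l ++ [t])] := by
          apply PySem.Dict.ext; simp [PySem.Dict.modify, PySem.Dict.insert, PySem.Dict.getD, PySem.Dict.get?, PySem.Dict.contains]
        rw [this, ih]
        simp only [decide_eq_true_eq]
        rw [if_neg (by omega), if_neg (by omega), if_pos (by omega)]
        simp

-- ===== VERDICT =====
theorem group_tables_by_size_spec : Claim_equal_group_tables_by_size := by
  intro tables table_sizes _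
  unfold Spec_group_tables_by_size group_tables_by_size group_tables_by_size_alt
  have := gtbs_fold table_sizes tables [] [] []
  simpa [PySem.Dict.ofList] using this
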